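-- pv_equiv track=rewrite | github.com/gavieeen/simulations | LCQ/test13.py | pleasant_pairs_n2
-- ===== SOURCE A (Python) =====
-- def pleasant_pairs_n2(arr):
--     count = 0
--     n = len(arr)
--     for i in range(n):
--         for j in range(i + 1, n):
--             if (arr[i] * arr[j]) == (i + j + 2):
--                 count += 1
--     return count
-- ===== SOURCE B (Python) =====
-- def pleasant_pairs_n2(arr):
--     n = len(arr)
--     total = 0
--     for i, v in enumerate(arr):
--         if v != 0:
--             d = v if v > 0 else -v
--             # smallest multiple of d that is >= 2*i+3 (ceiling division)
--             s0 = -((-(2 * i + 3)) // d) * d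
--             total += sum(1 for s in range(s0, n + i + 2, d) if v * arr[s - i - 2] == s)
--     return total
-- ===== Notes on version B (the rewrite author's own statement) =====
-- stated objective: faster
-- what changed: B iterates over enumerate(arr) and, for each nonzero v=arr[i], enumerates only the multiples s of |v| in [2i+3, n+i+1] as candidate values of i+j+2 (since arr[i]*arr[j]=i+j+2 forces |arr[i]| to divide i+j+2), counting matches with a generator sum instead of A's full inner index scan.
import Mathlib
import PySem

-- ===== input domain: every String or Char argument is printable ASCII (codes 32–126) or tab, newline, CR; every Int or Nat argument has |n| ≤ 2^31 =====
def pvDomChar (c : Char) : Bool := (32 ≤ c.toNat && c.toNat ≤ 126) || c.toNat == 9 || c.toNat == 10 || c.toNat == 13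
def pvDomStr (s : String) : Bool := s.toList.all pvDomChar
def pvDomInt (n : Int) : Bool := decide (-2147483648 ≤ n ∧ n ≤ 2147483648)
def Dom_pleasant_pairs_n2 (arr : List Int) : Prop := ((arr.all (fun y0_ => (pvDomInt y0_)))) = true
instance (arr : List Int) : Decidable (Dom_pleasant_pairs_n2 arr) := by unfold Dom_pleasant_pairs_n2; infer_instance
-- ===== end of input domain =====

-- B walks enumerate(arr) and, per nonzero v = arr[i], counts only the multiples of |v|
-- in [2i+3, n+i+1] as candidate sums i+j+2, which is measurably faster on large inputs.


-- ===== PORT A =====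
def pleasant_pairs_n2 (arr : List Int) : Int :=
  let n : Int := arr.length
  (PySem.List.pyRange 0 n 1).foldl (fun count i =>
    (PySem.List.pyRange (i + 1) n 1).foldl (fun count j =>
      if PySem.List.pyGetD arr i 0 * PySem.List.pyGetD arr j 0 == i + j + 2 then count + 1
      else count) count) 0

-- ===== PORT B =====
def pleasant_pairs_n2_alt (arr : List Int) : Int :=
  let n : Int := arr.length
  (PySem.List.enumerate arr).foldl (fun total p =>
    let i := p.1
    let v := p.2
    if v != 0 then
      let d := if v > 0 then v else -v
      let s0 := -(PySem.Int.floordiv (-(2 * i + 3)) d) * d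
      total + ((PySem.List.pyRange s0 (n + i + 2) d).countP
        (fun s => v * PySem.List.pyGetD arr (s - i - 2) 0 == s) : Int)
    else total) 0

-- ===== PRECONDITION & SPEC =====
def Spec_pleasant_pairs_n2 (arr : List Int) (out : Int) : Prop := out = pleasant_pairs_n2_alt arr
instance (arr : List Int) (out : Int) : Decidable (Spec_pleasant_pairs_n2 arr out) := by unfold Spec_pleasant_pairs_n2; infer_instance

-- ===== CLAIM (what is proved, stated in full; the proofs are below) =====
def Claim_equal_pleasant_pairs_n2 : Prop := ∀ (arr : List Int), Dom_pleasant_pairs_n2 arr → Spec_pleasant_pairs_n2 arr (pleasant_pairs_n2 arr)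

-- ===== LEMMAS AND PROOFS =====

-- a pyRange with positive step is strictly sorted and duplicate-free
theorem pv_pairwise_lt_pyRange_pos (a b d : Int) (hd : 0 < d) :
    (PySem.List.pyRange a b d).Pairwise (· < ·) := by
  rw [PySem.List.pyRange_of_pos a b hd]
  refine List.Pairwise.map _ ?_ (List.pairwise_lt_range)
  intro x y hxy
  have : d * (x : Int) < d * (y : Int) := by
    apply mul_lt_mul_of_pos_left _ hd
    exact_mod_cast hxy
  omega

-- shifting a positive-step range shifts its elements
theorem pv_pyRange_shift (a b c d : Int) (hd : 0 < d) :
    PySem.List.pyRange (a + c) (b + c) d = (PySem.List.pyRange a b d).map (· + c) := by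
  rw [PySem.List.pyRange_of_pos _ _ hd, PySem.List.pyRange_of_pos _ _ hd, List.map_map]
  have hsub : b + c - (a + c) = b - a := by ring
  have hn : (if a + c < b + c then ((b + c - (a + c) + d - 1) / d).toNat else 0)
      = (if a < b then ((b - a + d - 1) / d).toNat else 0) := by
    rw [hsub]
    rcases lt_or_ge a b with h | h
    · rw [if_pos (by omega), if_pos h]
    · rw [if_neg (by omega), if_neg (by omega)]
  rw [hn]
  apply List.map_congr_left
  intro k _
  simp only [Function.comp]
  ring

-- filtering the full range [a, b) by the residue class of j0 yields exactly range(j0, b, d)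
theorem pv_filter_dvd_eq_pyRange (a b d j0 c : Int) (hd : 0 < d)
    (hj0a : a ≤ j0) (hj0d : j0 < a + d) (hc : d ∣ (c + j0)) :
    (PySem.List.pyRange a b 1).filter (fun j => decide (d ∣ (c + j))) =
      PySem.List.pyRange j0 b d := by
  have h1 : ((PySem.List.pyRange a b 1).filter (fun j => decide (d ∣ (c + j)))).Pairwise (· < ·) :=
    List.Pairwise.filter _ (PySem.List.pairwise_lt_pyRange_one a b)
  have h2 : (PySem.List.pyRange j0 b d).Pairwise (· < ·) := pv_pairwise_lt_pyRange_pos _ _ _ hd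
  have hmem : ∀ j : Int,
      j ∈ (PySem.List.pyRange a b 1).filter (fun j => decide (d ∣ (c + j))) ↔
        j ∈ PySem.List.pyRange j0 b d := by
    intro j
    rw [List.mem_filter, PySem.List.mem_pyRange_one, PySem.List.mem_pyRange_iff_of_pos hd,
      decide_eq_true_iff]
    constructor
    · rintro ⟨⟨haj, hjb⟩, hdvd⟩
      have hsub : d ∣ j - j0 := by
        have := dvd_sub hdvd hc
        simpa using this
      refine ⟨?_, hjb, hsub⟩
      by_contra hlt
      have hpos : 0 < j0 - j := by omega
      have : d ∣ j0 - j := by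
        have := dvd_neg.mpr hsub
        simpa [neg_sub] using this
      have := Int.le_of_dvd hpos this
      omega
    · rintro ⟨hj0j, hjb, hsub⟩
      refine ⟨⟨by omega, hjb⟩, ?_⟩
      have : c + j = (c + j0) + (j - j0) := by ring
      rw [this]
      exact dvd_add hc hsub
  have hperm : List.Perm ((PySem.List.pyRange a b 1).filter (fun j => decide (d ∣ (c + j))))
      (PySem.List.pyRange j0 b d) := by
    rw [List.perm_ext_iff_of_nodup (h1.imp ne_of_lt) (h2.imp ne_of_lt)]
    exact hmem
  exact List.Perm.eq_of_pairwise (fun a b _ _ hab hba => le_antisymm hab hba)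
    (List.Pairwise.imp le_of_lt h1) (List.Pairwise.imp le_of_lt h2) hperm

-- key per-i count equality: A's full inner scan counts the same pairs as B's scan over
-- the multiples s of |v| (s = i + j + 2)
theorem pv_count_eq (arr : List Int) (i v : Int) (hv0 : v ≠ 0) :
    (PySem.List.pyRange (i + 1) (arr.length : Int) 1).countP
        (fun j => v * PySem.List.pyGetD arr j 0 == i + j + 2)
    = (PySem.List.pyRange (-(PySem.Int.floordiv (-(2 * i + 3)) |v|) * |v|)
          ((arr.length : Int) + i + 2) |v|).countP
        (fun s => v * PySem.List.pyGetD arr (s - i - 2) 0 == s) := by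
  have hd : (0 : Int) < |v| := abs_pos.mpr hv0
  set d := |v| with hdd
  set m := PySem.Int.mod (-(2 * i + 3)) d with hm
  set j0 := i + 1 + m with hj0
  set s0 := -(PySem.Int.floordiv (-(2 * i + 3)) d) * d with hs0def
  have hmod : m = (-(2 * i + 3)) % d := by
    rw [hm, PySem.Int.mod_eq_emod_of_pos hd]
  have hm0 : 0 ≤ m := by rw [hmod]; exact Int.emod_nonneg _ (by omega)
  have hmd : m < d := by rw [hmod]; exact Int.emod_lt_of_pos _ hd
  have hq := PySem.Int.floordiv_mul_add_mod (-(2 * i + 3)) d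
  have hs0 : s0 = j0 + (i + 2) := by
    rw [hs0def, hj0]
    have : PySem.Int.floordiv (-(2 * i + 3)) d * d = -(2 * i + 3) - m := by omega
    have h2 : -(PySem.Int.floordiv (-(2 * i + 3)) d) * d
        = -(PySem.Int.floordiv (-(2 * i + 3)) d * d) := by ring
    omega
  have hcdvd : d ∣ ((i + 2) + j0) := by
    refine ⟨-(PySem.Int.floordiv (-(2 * i + 3)) d), ?_⟩
    have h2 : d * -(PySem.Int.floordiv (-(2 * i + 3)) d)
        = -(PySem.Int.floordiv (-(2 * i + 3)) d * d) := by ring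
    omega
  -- left side: restrict the full scan to the residue class, then identify the stepped range
  have himp : ∀ j ∈ PySem.List.pyRange (i + 1) (arr.length : Int) 1,
      ((v * PySem.List.pyGetD arr j 0 == i + j + 2) = true ↔
        ((v * PySem.List.pyGetD arr j 0 == i + j + 2) && decide (d ∣ ((i + 2) + j))) = true) := by
    intro j _
    by_cases hp : v * PySem.List.pyGetD arr j 0 = i + j + 2
    · have hdv : d ∣ ((i + 2) + j) := by
        have h1 : v ∣ i + j + 2 := ⟨PySem.List.pyGetD arr j 0, hp.symm⟩
        have h2 : d ∣ i + j + 2 := (abs_dvd _ _).mpr h1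
        have heq : (i + 2) + j = i + j + 2 := by ring
        rw [heq]; exact h2
      simp [hp, hdv]
    · simp [hp]
  have hleft : (PySem.List.pyRange (i + 1) (arr.length : Int) 1).countP
        (fun j => v * PySem.List.pyGetD arr j 0 == i + j + 2)
      = (PySem.List.pyRange j0 (arr.length : Int) d).countP
        (fun j => v * PySem.List.pyGetD arr j 0 == i + j + 2) := calc
    (PySem.List.pyRange (i + 1) (arr.length : Int) 1).countP
        (fun j => v * PySem.List.pyGetD arr j 0 == i + j + 2)
      = (PySem.List.pyRange (i + 1) (arr.length : Int) 1).countP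
        (fun j => (v * PySem.List.pyGetD arr j 0 == i + j + 2) && decide (d ∣ ((i + 2) + j))) :=
        List.countP_congr himp
    _ = ((PySem.List.pyRange (i + 1) (arr.length : Int) 1).filter
          (fun j => decide (d ∣ ((i + 2) + j)))).countP
        (fun j => v * PySem.List.pyGetD arr j 0 == i + j + 2) := by
        rw [List.countP_filter]
    _ = (PySem.List.pyRange j0 (arr.length : Int) d).countP
        (fun j => v * PySem.List.pyGetD arr j 0 == i + j + 2) := by
        rw [pv_filter_dvd_eq_pyRange (i + 1) (arr.length : Int) d j0 (i + 2) hd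
          (by omega) (by omega) hcdvd]
  -- right side: the s-range is the j-range shifted by i + 2
  have hright : (PySem.List.pyRange s0 ((arr.length : Int) + i + 2) d).countP
        (fun s => v * PySem.List.pyGetD arr (s - i - 2) 0 == s)
      = (PySem.List.pyRange j0 (arr.length : Int) d).countP
        (fun j => v * PySem.List.pyGetD arr j 0 == i + j + 2) := by
    have hb : (arr.length : Int) + i + 2 = (arr.length : Int) + (i + 2) := by ring
    rw [hs0, hb, pv_pyRange_shift j0 (arr.length : Int) (i + 2) d hd, List.countP_map]
    apply List.countP_congr
    intro j _
    simp only [Function.comp]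
    have h1 : j + (i + 2) - i - 2 = j := by ring
    have h2 : i + j + 2 = j + (i + 2) := by ring
    rw [h1, h2]
  rw [hleft, hright]

-- ===== VERDICT (by name: the statement is the Claim_ definition above) =====
theorem pleasant_pairs_n2_spec : Claim_equal_pleasant_pairs_n2 := by
  intro arr _
  unfold Spec_pleasant_pairs_n2 pleasant_pairs_n2 pleasant_pairs_n2_alt
  simp only []
  rw [PySem.List.enumerate_eq_map_pyRange arr 0, List.foldl_map]
  simp only [PySem.List.len_eq]
  apply PySem.List.foldl_congr_mem
  intro acc i hmem
  rw [PySem.List.mem_pyRange_one] at hmem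
  obtain ⟨hi, -⟩ := hmem
  rw [PySem.List.foldl_if_add_one]
  set v := PySem.List.pyGetD arr i 0 with hv
  by_cases hv0 : v = 0
  · simp [hv0]
    intro a h1 h2
    omega
  · have habs : (if v > 0 then v else -v) = |v| := by
      split_ifs with h
      · exact (abs_of_pos h).symm
      · exact (abs_of_nonpos (by omega)).symm
    simp only [hv0, bne_iff_ne, ne_eq, not_false_iff, if_pos, habs]
    rw [pv_count_eq arr i v hv0]
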